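-- pv_equiv track=rewrite | github.com/tomasvanagas/prime-research | experiments/circuit_complexity/ie_as_determinant.py | compute_ie_sum
-- ===== SOURCE A (Python) =====
-- def compute_ie_sum(x, P):
--     """Compute the inclusion-exclusion sum for the Legendre sieve."""
--     k = len(P)
--     total = 0
--     for mask in range(1 << k):
--         prod_S = 1
--         bits = bin(mask).count('1')
--         for i in range(k):
--             if mask & (1 << i):
--                 prod_S *= P[i]
--         total += ((-1)**bits) * (x // prod_S)
--     return total
-- ===== SOURCE B (Python) =====
-- def compute_ie_sum(x, P):
--     """Compute the inclusion-exclusion sum for the Legendre sieve.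
--
--     Recursive subset enumeration: each element is either skipped or folded
--     into the running product (flipping the sign), so the product and parity
--     are built incrementally instead of being recomputed per bitmask.
--     """
--     def _go(ps, prod, sign):
--         if not ps:
--             return sign * (x // prod)
--         rest = ps[1:]
--         return _go(rest, prod, sign) + _go(rest, prod * ps[0], -sign)
--     return _go(P, 1, 1)
-- ===== Notes on version B (the rewrite author's own statement) =====
-- stated objective: faster
-- what changed: Replaces the per-bitmask loop (which recomputes popcount and the subset product from scratch for each of the 2^k masks) by a recursive subset enumeration that extends the running product and flips the sign incrementally, one floor division per subset; intended as faster (O(2^k) vs O(k*2^k)), measured 8.4x at the largest size both programs finish (both are exponential in len(P), so neither finishes on larger inputs).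
import Mathlib
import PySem

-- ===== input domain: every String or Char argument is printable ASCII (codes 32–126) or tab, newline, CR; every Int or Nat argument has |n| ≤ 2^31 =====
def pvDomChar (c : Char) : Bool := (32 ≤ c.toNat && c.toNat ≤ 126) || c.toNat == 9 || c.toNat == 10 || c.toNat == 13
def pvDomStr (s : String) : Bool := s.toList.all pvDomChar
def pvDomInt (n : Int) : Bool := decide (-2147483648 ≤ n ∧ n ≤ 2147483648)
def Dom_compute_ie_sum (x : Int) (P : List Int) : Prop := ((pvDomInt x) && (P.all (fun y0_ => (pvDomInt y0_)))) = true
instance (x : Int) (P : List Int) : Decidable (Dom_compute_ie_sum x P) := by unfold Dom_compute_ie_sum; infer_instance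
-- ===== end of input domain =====

-- B replaces A's per-bitmask recomputation of popcount and subset product by a
-- recursive subset enumeration building the product and sign incrementally
-- (intended as faster: O(2^k) vs O(k·2^k); measured 8.4× at the largest size both finish).

-- ===== PORT A =====
-- Literal port of A: for mask in range(1 << k): bits = bin(mask).count('1')
-- (= PySem.Int.bitCount, exact: bin(n).count('1') is the popcount of |n|);
-- inner loop over i in range(k) with the bit test mask & (1 << i)
-- (1 << i on a range index i ≥ 0, so `.toNat` on i is exact) and P[i]
-- (i always in range, so pyGetD's default 0 is never used).
def compute_ie_sum (x : Int) (P : List Int) : Int :=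
  let k := P.length
  (PySem.List.pyRange 0 ((1 : Int) <<< k) 1).foldl (fun total mask =>
    let bits := PySem.Int.bitCount mask
    let prod_S := (PySem.List.pyRange 0 (k : Int) 1).foldl (fun pr i =>
      if PySem.Int.band mask ((1 : Int) <<< i.toNat) ≠ 0 then pr * PySem.List.pyGetD P i 0
      else pr) 1
    total + (-1 : Int) ^ bits * PySem.Int.floordiv x prod_S) 0

-- ===== PORT B =====
def ieGo (x : Int) : List Int → Int → Int → Int
  | [], prod, sign => sign * PySem.Int.floordiv x prod
  | p :: rest, prod, sign => ieGo x rest prod sign + ieGo x rest (prod * p) (-sign)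

def compute_ie_sum_alt (x : Int) (P : List Int) : Int :=
  ieGo x P 1 1

-- ===== PRECONDITION & SPEC =====
-- Pre_ excludes exactly the inputs where the Python A raises ZeroDivisionError
-- (a 0 in P makes the singleton mask's product 0); B raises there as well.
def Pre_compute_ie_sum (x : Int) (P : List Int) : Prop := (0 : Int) ∉ P
instance (x : Int) (P : List Int) : Decidable (Pre_compute_ie_sum x P) := by
  unfold Pre_compute_ie_sum; infer_instance

def pvWitness_compute_ie_sum : Int × List Int := (30, [2, 3, 5])

def Spec_compute_ie_sum (x : Int) (P : List Int) (out : Int) : Prop := out = compute_ie_sum_alt x P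
instance (x : Int) (P : List Int) (out : Int) : Decidable (Spec_compute_ie_sum x P out) := by
  unfold Spec_compute_ie_sum; infer_instance

-- ===== CLAIM (what is proved, stated in full; the proofs are below) =====
def Claim_equal_compute_ie_sum : Prop := ∀ (x : Int) (P : List Int), Dom_compute_ie_sum x P → Pre_compute_ie_sum x P → Spec_compute_ie_sum x P (compute_ie_sum x P)

-- ===== LEMMAS AND PROOFS =====

-- The common middle form: Hs x c P = Σ over sublists S of P of (-1)^|S| * (x // (c * ΠS)),
-- defined by its head recursion.
def Hs (x : Int) : Int → List Int → Int
  | c, [] => PySem.Int.floordiv x c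
  | c, p :: ps => Hs x c ps - Hs x (c * p) ps

theorem ieGo_eq_Hs (x : Int) (P : List Int) : ∀ (c s : Int), ieGo x P c s = s * Hs x c P := by
  induction P with
  | nil => intro c s; simp [ieGo, Hs]
  | cons p ps ih => intro c s; simp [ieGo, Hs, ih]; ring

theorem Hs_snoc (x : Int) (P : List Int) (p : Int) :
    ∀ c : Int, Hs x c (P ++ [p]) = Hs x c P - Hs x (c * p) P := by
  induction P with
  | nil => intro c; simp [Hs]
  | cons q ps ih =>
    intro c
    simp only [List.cons_append, Hs, ih]
    rw [mul_right_comm c p q]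
    ring

-- The inner loop of A, abstracted over a Nat mask and a general start value.
def Q (P : List Int) (m : Nat) (c : Int) : Int :=
  (List.range P.length).foldl (fun pr i => if m.testBit i then pr * P.getD i 0 else pr) c

theorem foldl_ifmul_mul {α : Type} (f : α → Prop) [DecidablePred f] (g : α → Int) (l : List α) :
    ∀ c d : Int, l.foldl (fun pr i => if f i then pr * g i else pr) (c * d)
      = l.foldl (fun pr i => if f i then pr * g i else pr) c * d := by
  induction l with
  | nil => intro c d; rfl
  | cons a l ih =>
    intro c d
    simp only [List.foldl_cons]
    by_cases h : f a
    · simp only [h, if_pos]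
      rw [show c * d * g a = c * g a * d by ring, ih]
    · simp only [h, if_neg, not_false_iff]
      exact ih c d

theorem Q_mul (P : List Int) (m : Nat) (c d : Int) : Q P m (c * d) = Q P m c * d := by
  unfold Q; exact foldl_ifmul_mul _ _ _ c d

theorem Q_snoc_lo (P : List Int) (p : Int) (m : Nat) (hm : m < 2 ^ P.length) (c : Int) :
    Q (P ++ [p]) m c = Q P m c := by
  unfold Q
  rw [List.length_append, List.length_singleton, List.range_succ, List.foldl_append]
  have h1 : (List.range P.length).foldl
      (fun pr i => if m.testBit i then pr * (P ++ [p]).getD i 0 else pr) c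
      = (List.range P.length).foldl (fun pr i => if m.testBit i then pr * P.getD i 0 else pr) c := by
    apply PySem.List.foldl_congr_mem
    intro acc i hi
    rw [List.mem_range] at hi
    rw [List.getD_append _ _ _ _ hi]
  rw [h1]
  simp [Nat.testBit_lt_two_pow hm]

theorem Q_snoc_hi (P : List Int) (p : Int) (m : Nat) (hm : m < 2 ^ P.length) (c : Int) :
    Q (P ++ [p]) (2 ^ P.length + m) c = Q P m c * p := by
  unfold Q
  rw [List.length_append, List.length_singleton, List.range_succ, List.foldl_append]
  have h1 : (List.range P.length).foldl
      (fun pr i => if (2 ^ P.length + m).testBit i then pr * (P ++ [p]).getD i 0 else pr) c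
      = (List.range P.length).foldl (fun pr i => if m.testBit i then pr * P.getD i 0 else pr) c := by
    apply PySem.List.foldl_congr_mem
    intro acc i hi
    rw [List.mem_range] at hi
    rw [Nat.testBit_two_pow_add_gt hi, List.getD_append _ _ _ _ hi]
  rw [h1]
  have h2 : (2 ^ P.length + m).testBit P.length = true := by
    rw [Nat.testBit_two_pow_add_eq, Nat.testBit_lt_two_pow hm]; rfl
  have h3 : (P ++ [p]).getD P.length 0 = p := by
    rw [List.getD_eq_getElem?_getD, List.getElem?_append_right (le_refl _)]
    simp
  simp [h2]

-- popcount of 2^k + m adds one bit for m < 2^k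
theorem bitCount_two_pow_add (k : Nat) :
    ∀ m : Nat, m < 2 ^ k →
      PySem.Int.bitCount ((2 ^ k + m : Nat) : Int) = PySem.Int.bitCount (m : Int) + 1 := by
  induction k with
  | zero =>
    intro m hm
    interval_cases m
    decide
  | succ k ih =>
    intro m hm
    have hpos : 0 < 2 ^ (k + 1) + m := by positivity
    rw [PySem.Int.bitCount_natCast hpos]
    have hdiv : (2 ^ (k + 1) + m) / 2 = 2 ^ k + m / 2 := by omega
    have hmod : (2 ^ (k + 1) + m) % 2 = m % 2 := by omega
    rw [hdiv, hmod, ih (m / 2) (by omega)]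
    by_cases hm0 : m = 0
    · subst hm0; simp [PySem.Int.bitCount_zero]
    · rw [PySem.Int.bitCount_natCast (Nat.pos_of_ne_zero hm0)]
      omega

theorem sum_map_neg {α : Type} (l : List α) (g : α → Int) :
    (l.map (fun a => -g a)).sum = -(l.map g).sum := by
  induction l with
  | nil => simp
  | cons a l ih => simp [ih]; ring

-- The A-side generalized sum equals Hs.
theorem Asum (x : Int) (P : List Int) :
    ∀ c : Int,
      ((List.range (2 ^ P.length)).map
        (fun (m : Nat) => (-1 : Int) ^ PySem.Int.bitCount (m : Int) * PySem.Int.floordiv x (Q P m c))).sum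
      = Hs x c P := by
  induction P using List.reverseRecOn with
  | nil =>
    intro c
    simp [Q, Hs, PySem.Int.bitCount_zero]
  | append_singleton P p ih =>
    intro c
    rw [List.length_append, List.length_singleton, pow_succ, mul_two, List.range_add,
      List.map_append, List.sum_append, List.map_map]
    have h1 : ((List.range (2 ^ P.length)).map
        (fun (m : Nat) => (-1 : Int) ^ PySem.Int.bitCount (m : Int)
          * PySem.Int.floordiv x (Q (P ++ [p]) m c))).sum
        = Hs x c P := by
      rw [← ih c]
      congr 1
      apply List.map_congr_left
      intro m hm
      rw [List.mem_range] at hm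
      rw [Q_snoc_lo P p m hm c]
    have h2 : ((List.range (2 ^ P.length)).map
        ((fun (m : Nat) => (-1 : Int) ^ PySem.Int.bitCount (m : Int)
          * PySem.Int.floordiv x (Q (P ++ [p]) m c)) ∘ fun m => 2 ^ P.length + m)).sum
        = -Hs x (c * p) P := by
      rw [← ih (c * p), ← sum_map_neg]
      congr 1
      apply List.map_congr_left
      intro m hm
      rw [List.mem_range] at hm
      simp only [Function.comp_apply]
      rw [bitCount_two_pow_add P.length m hm, Q_snoc_hi P p m hm c, ← Q_mul, pow_succ]
      ring
    rw [h1, h2, Hs_snoc]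
    ring

theorem band_two_pow_ne (m i : Nat) :
    (PySem.Int.band (m : Int) ((1 : Int) <<< ((i : Nat) : Int)) ≠ 0) ↔ m.testBit i = true := by
  rw [Int.one_shiftLeft, PySem.Int.band_natCast]
  rcases hb : m.testBit i with _ | _
  · simp [Nat.and_two_pow, hb]
  · constructor
    · intro _; rfl
    · intro _
      have : m &&& 2 ^ i = 2 ^ i := by rw [Nat.and_two_pow, hb]; simp
      simp [this]

theorem inner_eq_Q (P : List Int) (m : Nat) :
    (PySem.List.pyRange 0 (P.length : Int) 1).foldl (fun pr i =>
      if PySem.Int.band (m : Int) ((1 : Int) <<< i.toNat) ≠ 0 then pr * PySem.List.pyGetD P i 0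
      else pr) 1 = Q P m 1 := by
  rw [show ((P.length : Int)) = ((P.length : Nat) : Int) from rfl, PySem.List.pyRange_zero_natCast,
    List.foldl_map]
  unfold Q
  apply PySem.List.foldl_congr_mem
  intro acc i _
  simp only [Int.toNat_natCast, PySem.List.pyGetD_natCast, band_two_pow_ne]

theorem A_eq_sum (x : Int) (P : List Int) :
    compute_ie_sum x P
      = ((List.range (2 ^ P.length)).map
          (fun (m : Nat) => (-1 : Int) ^ PySem.Int.bitCount (m : Int)
            * PySem.Int.floordiv x (Q P m 1))).sum := by
  simp only [compute_ie_sum]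
  rw [show (1 : Int) <<< P.length = ((2 ^ P.length : Nat) : Int) by
      rw [Int.shiftLeft_eq]; push_cast; ring,
    PySem.List.pyRange_zero_natCast (2 ^ P.length), List.foldl_map, PySem.List.foldl_add, zero_add]
  congr 1
  apply List.map_congr_left
  intro m _
  rw [inner_eq_Q P m]

-- ===== VERDICT (by name: the statement is the Claim_ definition above) =====
theorem compute_ie_sum_spec : Claim_equal_compute_ie_sum := by
  intro x P _ _
  unfold Spec_compute_ie_sum compute_ie_sum_alt
  rw [A_eq_sum, Asum x P 1, ieGo_eq_Hs, one_mul]
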